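-- pv_equiv track=rewrite | github.com/NewonOnGit/self-reference-seed | modular/algebra.py | chain_status
-- ===== SOURCE A (Python) =====
-- class ResultType:
--     """Status of a research result. Ordered by evidential strength."""
--
--     RAW_MATCH = 'RAW_MATCH'
--     COMPUTED_MATCH = 'COMPUTED_MATCH'
--     DERIVED_CANDIDATE = 'DERIVED_CANDIDATE'
--     PATH_CANDIDATE = 'PATH_CANDIDATE'
--     LAW_CANDIDATE = 'LAW_CANDIDATE'
--     LAW = 'LAW'
--     FAILED = 'FAILED'
--     REFUTED = 'REFUTED'
--     FORBIDDEN = 'FORBIDDEN'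
--     MYTHIC_RESIDUE = 'MYTHIC_RESIDUE'
--     GAUGE_RESIDUE = 'GAUGE_RESIDUE'
--     OPEN_FRONTIER = 'OPEN_FRONTIER'
--
-- class EdgeType:
--     """Types of edges in the knowledge graph. Ordered by forcing strength."""
--
--     OPERATION_PRODUCES = 'OPERATION_PRODUCES'
--     IDENTITY_CASTS = 'IDENTITY_CASTS'
--     LIFT_PROPAGATES = 'LIFT_PROPAGATES'
--     COMPUTED_BY = 'COMPUTED_BY'
--     NUMERICAL_MATCHES = 'NUMERICAL_MATCHES'
--     IDENTIFIED_WITH = 'IDENTIFIED_WITH'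
--     STRUCTURAL_PARALLEL = 'STRUCTURAL_PARALLEL'
--     FAILED_BRIDGE = 'FAILED_BRIDGE'
--
-- FORCED_EDGE_TYPES = {
--     EdgeType.OPERATION_PRODUCES,
--     EdgeType.IDENTITY_CASTS,
--     EdgeType.LIFT_PROPAGATES,
--     EdgeType.COMPUTED_BY,
-- }
--
-- WEAK_EDGE_TYPES = {
--     EdgeType.NUMERICAL_MATCHES,
--     EdgeType.IDENTIFIED_WITH,
--     EdgeType.STRUCTURAL_PARALLEL,
-- }
--
-- def chain_status(edge_types):
--     """Given a list of edge types in a chain, determine max promotable status."""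
--     if any(e == EdgeType.FAILED_BRIDGE for e in edge_types):
--         return ResultType.REFUTED
--     if all(e in FORCED_EDGE_TYPES for e in edge_types):
--         return ResultType.LAW
--     if any(e in WEAK_EDGE_TYPES for e in edge_types):
--         return ResultType.LAW_CANDIDATE
--     return ResultType.DERIVED_CANDIDATE
-- ===== SOURCE B (Python) =====
-- FORCED_EDGE_TYPES = {'OPERATION_PRODUCES', 'IDENTITY_CASTS', 'LIFT_PROPAGATES', 'COMPUTED_BY'}
-- WEAK_EDGE_TYPES = {'NUMERICAL_MATCHES', 'IDENTIFIED_WITH', 'STRUCTURAL_PARALLEL'}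
--
-- def chain_status(edge_types):
--     saw_failed = False
--     all_forced = True
--     saw_weak = False
--     for e in edge_types:
--         if e == 'FAILED_BRIDGE':
--             saw_failed = True
--         if e not in FORCED_EDGE_TYPES:
--             all_forced = False
--         if e in WEAK_EDGE_TYPES:
--             saw_weak = True
--     if saw_failed:
--         return 'REFUTED'
--     elif all_forced:
--         return 'LAW'
--     elif saw_weak:
--         return 'LAW_CANDIDATE'
--     else:
--         return 'DERIVED_CANDIDATE'
-- ===== Notes on version B (the rewrite author's own statement) =====
-- stated objective: alternative
-- what changed: Replaced A's three separate passes (any/all/any) over the list with a single loop maintaining three boolean accumulators, applying the same priority once after the scan.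
import Mathlib
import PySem

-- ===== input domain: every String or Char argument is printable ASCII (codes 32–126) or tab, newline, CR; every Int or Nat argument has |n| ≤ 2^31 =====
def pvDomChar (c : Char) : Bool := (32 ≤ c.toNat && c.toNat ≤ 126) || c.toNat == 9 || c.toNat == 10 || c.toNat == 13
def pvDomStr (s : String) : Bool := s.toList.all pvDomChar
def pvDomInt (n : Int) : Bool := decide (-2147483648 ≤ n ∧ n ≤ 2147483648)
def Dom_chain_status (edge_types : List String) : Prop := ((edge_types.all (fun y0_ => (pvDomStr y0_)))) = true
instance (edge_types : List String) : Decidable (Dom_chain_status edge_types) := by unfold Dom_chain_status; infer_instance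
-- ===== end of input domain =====

-- B replaces A's three separate passes (any/all/any) with one loop keeping three boolean accumulators; alternative decomposition, same cost.

-- ===== PORT A =====
def pvForced (e : String) : Bool :=
  e == "OPERATION_PRODUCES" || e == "IDENTITY_CASTS" || e == "LIFT_PROPAGATES" || e == "COMPUTED_BY"

def pvWeak (e : String) : Bool :=
  e == "NUMERICAL_MATCHES" || e == "IDENTIFIED_WITH" || e == "STRUCTURAL_PARALLEL"

def chain_status (edge_types : List String) : String :=
  if edge_types.any (fun e => e == "FAILED_BRIDGE") then "REFUTED"
  else if edge_types.all (fun e => pvForced e) then "LAW"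
  else if edge_types.any (fun e => pvWeak e) then "LAW_CANDIDATE"
  else "DERIVED_CANDIDATE"

-- ===== PORT B =====
def chain_status_alt (edge_types : List String) : String :=
  let st := edge_types.foldl
    (fun (acc : Bool × Bool × Bool) e =>
      (acc.1 || e == "FAILED_BRIDGE",
       acc.2.1 && pvForced e,
       acc.2.2 || pvWeak e))
    (false, true, false)
  if st.1 then "REFUTED"
  else if st.2.1 then "LAW"
  else if st.2.2 then "LAW_CANDIDATE"
  else "DERIVED_CANDIDATE"

-- ===== PRECONDITION & SPEC =====
def Spec_chain_status (edge_types : List String) (out : String) : Prop := out = chain_status_alt edge_types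
instance (edge_types : List String) (out : String) : Decidable (Spec_chain_status edge_types out) := by unfold Spec_chain_status; infer_instance

-- ===== CLAIM (what is proved, stated in full; the proofs are below) =====
def Claim_equal_chain_status : Prop := ∀ (edge_types : List String), Dom_chain_status edge_types → Spec_chain_status edge_types (chain_status edge_types)

-- ===== LEMMAS AND PROOFS =====
theorem chain_fold_eq (xs : List String) (a b c : Bool) :
    xs.foldl
      (fun (acc : Bool × Bool × Bool) e =>
        (acc.1 || e == "FAILED_BRIDGE",
         acc.2.1 && pvForced e,
         acc.2.2 || pvWeak e))
      (a, b, c)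
    = (a || xs.any (fun e => e == "FAILED_BRIDGE"),
       b && xs.all (fun e => pvForced e),
       c || xs.any (fun e => pvWeak e)) := by
  induction xs generalizing a b c with
  | nil => simp
  | cons x xs ih =>
    simp [List.foldl, ih, Bool.or_assoc, Bool.and_assoc]

-- ===== VERDICT (by name: the statement is the Claim_ definition above) =====
theorem chain_status_spec : Claim_equal_chain_status := by
  intro xs _
  unfold Spec_chain_status chain_status chain_status_alt
  simp [chain_fold_eq]
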